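-- pv_equiv track=rewrite | github.com/marchaesen/vcxsrv | mesalib/src/util/xmlpool/gen_xmlpool.py | expandCString
-- ===== SOURCE A (Python) =====
-- def expandCString(s):
--     escapeSeqs = {'a' : '\a', 'b' : '\b', 'f' : '\f', 'n' : '\n',
--                   'r' : '\r', 't' : '\t', 'v' : '\v',
--                   '"' : '"', '\\' : '\\'}
--     escape = False
--     hexa = False
--     octa = False
--     num = 0
--     digits = 0
--     r = u''
--     for c in s:
--         if not escape:
--             if c == '\\':
--                 escape = True
--             else:
--                 r = r + c
--         elif hexa:
--             if (c >= '0' and c <= '9') or \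
--                (c >= 'a' and c <= 'f') or \
--                (c >= 'A' and c <= 'F'):
--                 num = num * 16 + int(c, 16)
--                 digits = digits + 1
--             else:
--                 digits = 2
--             if digits >= 2:
--                 hexa = False
--                 escape = False
--                 r = r + chr(num)
--         elif octa:
--             if c >= '0' and c <= '7':
--                 num = num * 8 + int(c, 8)
--                 digits = digits + 1
--             else:
--                 digits = 3
--             if digits >= 3:
--                 octa = False
--                 escape = False
--                 r = r + chr(num)
--         else:
--             if c in escapeSeqs:
--                 r = r + escapeSeqs[c]
--                 escape = False
--             elif c >= '0' and c <= '7':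
--                 octa = True
--                 num = int(c, 8)
--                 if num <= 3:
--                     digits = 1
--                 else:
--                     digits = 2
--             elif c == 'x' or c == 'X':
--                 hexa = True
--                 num = 0
--                 digits = 0
--             else:
--                 r = r + c
--                 escape = False
--     return r
-- ===== SOURCE B (Python) =====
-- def expandCString(s):
--     escapeSeqs = {'a': '\a', 'b': '\b', 'f': '\f', 'n': '\n',
--                   'r': '\r', 't': '\t', 'v': '\v', '"': '"', '\\': '\\'}
--     out = []
--     i = 0
--     n = len(s)
--     while i < n:
--         c = s[i]
--         i += 1
--         if c != '\\':
--             out.append(c)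
--             continue
--         if i >= n:
--             break
--         c = s[i]
--         i += 1
--         if c in escapeSeqs:
--             out.append(escapeSeqs[c])
--         elif c == 'x' or c == 'X':
--             num = 0
--             digits = 0
--             done = False
--             while i < n and not done:
--                 d = s[i]
--                 i += 1
--                 if d in '0123456789abcdefABCDEF':
--                     num = num * 16 + int(d, 16)
--                     digits += 1
--                     done = digits >= 2
--                 else:
--                     done = True
--             if done:
--                 out.append(chr(num))
--         elif '0' <= c <= '7':
--             num = int(c, 8)
--             need = 2 if num <= 3 else 1
--             done = False
--             while i < n and not done:
--                 d = s[i]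
--                 i += 1
--                 if '0' <= d <= '7':
--                     num = num * 8 + int(d, 8)
--                     need -= 1
--                     done = need <= 0
--                 else:
--                     done = True
--             if done:
--                 out.append(chr(num))
--         else:
--             out.append(c)
--     return ''.join(out)
-- ===== Notes on version B (the rewrite author's own statement) =====
-- stated objective: alternative
-- what changed: Replaced A's single for-loop state machine (escape/hexa/octa flags threaded through every character) with an explicit index-based scanner that consumes each escape sequence with dedicated inner loops and no persistent mode flags.
import Mathlib
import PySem

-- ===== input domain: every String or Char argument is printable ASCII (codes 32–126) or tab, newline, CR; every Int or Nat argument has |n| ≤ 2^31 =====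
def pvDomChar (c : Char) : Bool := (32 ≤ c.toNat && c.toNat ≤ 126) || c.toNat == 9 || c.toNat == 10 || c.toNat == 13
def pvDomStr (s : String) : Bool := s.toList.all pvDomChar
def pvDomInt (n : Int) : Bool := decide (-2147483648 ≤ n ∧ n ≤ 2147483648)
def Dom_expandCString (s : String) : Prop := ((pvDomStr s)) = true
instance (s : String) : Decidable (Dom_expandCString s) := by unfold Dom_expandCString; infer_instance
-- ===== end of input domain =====

-- B replaces A's flag-based character-by-character state machine with an index-style scanner
-- that consumes each escape sequence with dedicated inner loops (alternative decomposition, same cost).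

-- ===== PORT A =====
-- A's escapeSeqs dict (each value is a one-character string)
def escapeSeqsA : List (Char × Char) :=
  [('a', Char.ofNat 7), ('b', Char.ofNat 8), ('f', Char.ofNat 12), ('n', '\n'),
   ('r', Char.ofNat 13), ('t', '\t'), ('v', Char.ofNat 11), ('"', '"'), ('\\', '\\')]

def escLookupA (c : Char) : Option Char :=
  ((escapeSeqsA.find? (fun p => p.1 == c)).map (·.2))

-- int(c, 16) on a verified hex digit
def hexValA (c : Char) : Nat :=
  if '0' ≤ c ∧ c ≤ '9' then c.toNat - 48
  else if 'a' ≤ c ∧ c ≤ 'f' then c.toNat - 87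
  else c.toNat - 55

-- int(c, 8) on a verified octal digit
def octValA (c : Char) : Nat := c.toNat - 48

structure StA where
  escape : Bool
  hexa   : Bool
  octa   : Bool
  num    : Nat
  digits : Nat
  r      : List Char
  deriving Repr

-- one iteration of A's for-loop, branch for branch
def stepA (st : StA) (c : Char) : StA :=
  if !st.escape then
    if c = '\\' then { st with escape := true }
    else { st with r := st.r ++ [c] }
  else if st.hexa then
    let nd : Nat × Nat :=
      if ('0' ≤ c ∧ c ≤ '9') ∨ ('a' ≤ c ∧ c ≤ 'f') ∨ ('A' ≤ c ∧ c ≤ 'F') then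
        (st.num * 16 + hexValA c, st.digits + 1)
      else (st.num, 2)
    if nd.2 ≥ 2 then
      { st with hexa := false, escape := false, num := nd.1, digits := nd.2,
                r := st.r ++ [Char.ofNat nd.1] }
    else { st with num := nd.1, digits := nd.2 }
  else if st.octa then
    let nd : Nat × Nat :=
      if '0' ≤ c ∧ c ≤ '7' then (st.num * 8 + octValA c, st.digits + 1)
      else (st.num, 3)
    if nd.2 ≥ 3 then
      { st with octa := false, escape := false, num := nd.1, digits := nd.2,
                r := st.r ++ [Char.ofNat nd.1] }
    else { st with num := nd.1, digits := nd.2 }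
  else
    match escLookupA c with
    | some e => { st with r := st.r ++ [e], escape := false }
    | none =>
      if '0' ≤ c ∧ c ≤ '7' then
        let num := octValA c
        { st with octa := true, num := num, digits := if num ≤ 3 then 1 else 2 }
      else if c = 'x' ∨ c = 'X' then
        { st with hexa := true, num := 0, digits := 0 }
      else { st with r := st.r ++ [c], escape := false }

def expandCString (s : String) : String :=
  String.mk (s.toList.foldl stepA ⟨false, false, false, 0, 0, []⟩).r

-- ===== PORT B =====
def escB (c : Char) : Option Char :=
  match c with
  | 'a' => some (Char.ofNat 7)
  | 'b' => some (Char.ofNat 8)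
  | 'f' => some (Char.ofNat 12)
  | 'n' => some '\n'
  | 'r' => some (Char.ofNat 13)
  | 't' => some '\t'
  | 'v' => some (Char.ofNat 11)
  | '"' => some '"'
  | '\\' => some '\\'
  | _ => none

def isHexB (c : Char) : Bool :=
  ('0' ≤ c && c ≤ '9') || ('a' ≤ c && c ≤ 'f') || ('A' ≤ c && c ≤ 'F')

def isOctB (c : Char) : Bool := '0' ≤ c && c ≤ '7'

def hexDigB (c : Char) : Nat :=
  if c ≤ '9' then c.toNat - 48 else if 'a' ≤ c then c.toNat - 87 else c.toNat - 55

-- B's inner hex while-loop: returns (some num) once the escape completes, plus the unconsumed rest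
def hexLoopB : Nat → Nat → List Char → Option Nat × List Char
  | _, _, [] => (none, [])
  | num, digits, d :: rest =>
    if isHexB d then
      if digits + 1 ≥ 2 then (some (num * 16 + hexDigB d), rest)
      else hexLoopB (num * 16 + hexDigB d) (digits + 1) rest
    else (some num, rest)

-- B's inner octal while-loop ('need' = digits still allowed)
def octLoopB : Nat → Nat → List Char → Option Nat × List Char
  | _, _, [] => (none, [])
  | num, need, d :: rest =>
    if isOctB d then
      if need ≤ 1 then (some (num * 8 + (d.toNat - 48)), rest)
      else octLoopB (num * 8 + (d.toNat - 48)) (need - 1) rest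
    else (some num, rest)

theorem hexLoopB_len : ∀ (n d : Nat) (l : List Char), (hexLoopB n d l).2.length ≤ l.length := by
  intro n d l
  induction l generalizing n d with
  | nil => simp [hexLoopB]
  | cons c rest ih =>
    simp only [hexLoopB]
    split <;> [skip; simp]
    split
    · simp
    · exact le_trans (ih _ _) (by simp)

theorem octLoopB_len : ∀ (n d : Nat) (l : List Char), (octLoopB n d l).2.length ≤ l.length := by
  intro n d l
  induction l generalizing n d with
  | nil => simp [octLoopB]
  | cons c rest ih =>
    simp only [octLoopB]
    split <;> [skip; simp]
    split
    · simp
    · exact le_trans (ih _ _) (by simp)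

def goB : List Char → List Char
  | [] => []
  | c :: rest =>
    if c ≠ '\\' then c :: goB rest
    else
      match rest with
      | [] => []
      | d :: rest2 =>
        match escB d with
        | some e => e :: goB rest2
        | none =>
          if d = 'x' || d = 'X' then
            let p := hexLoopB 0 0 rest2
            match p.1 with
            | some v => Char.ofNat v :: goB p.2
            | none => []
          else if isOctB d then
            let p := octLoopB (d.toNat - 48) (if d.toNat - 48 ≤ 3 then 2 else 1) rest2
            match p.1 with
            | some v => Char.ofNat v :: goB p.2
            | none => []
          else d :: goB rest2
termination_by l => l.length
decreasing_by
  all_goals simp only [List.length_cons]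
  · omega
  · omega
  · exact lt_of_le_of_lt (hexLoopB_len _ _ _) (by omega)
  · exact lt_of_le_of_lt (octLoopB_len _ _ _) (by omega)

def expandCString_alt (s : String) : String := String.mk (goB s.toList)

-- ===== PRECONDITION & SPEC =====
def Spec_expandCString (s : String) (out : String) : Prop := out = expandCString_alt s
instance (s : String) (out : String) : Decidable (Spec_expandCString s out) := by unfold Spec_expandCString; infer_instance

-- ===== CLAIM (what is proved, stated in full; the proofs are below) =====
def Claim_equal_expandCString : Prop := ∀ (s : String), Dom_expandCString s → Spec_expandCString s (expandCString s)

-- ===== LEMMAS AND PROOFS =====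

theorem char_le_iff (a b : Char) : a ≤ b ↔ a.toNat ≤ b.toNat := by
  rw [Char.le_def, UInt32.le_iff_toNat_le]; exact Iff.rfl

theorem escB_eq (c : Char) : escLookupA c = escB c := by
  unfold escB
  split
  case _ => decide
  case _ => decide
  case _ => decide
  case _ => decide
  case _ => decide
  case _ => decide
  case _ => decide
  case _ => decide
  case _ => decide
  case _ =>
    rename_i h1 h2 h3 h4 h5 h6 h7 h8 h9
    have e1 : ('a' == c) = false := by simp; exact Ne.symm h1
    have e2 : ('b' == c) = false := by simp; exact Ne.symm h2
    have e3 : ('f' == c) = false := by simp; exact Ne.symm h3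
    have e4 : ('n' == c) = false := by simp; exact Ne.symm h4
    have e5 : ('r' == c) = false := by simp; exact Ne.symm h5
    have e6 : ('t' == c) = false := by simp; exact Ne.symm h6
    have e7 : ('v' == c) = false := by simp; exact Ne.symm h7
    have e8 : ('\"' == c) = false := by simp; exact Ne.symm h8
    have e9 : ('\\' == c) = false := by simp; exact Ne.symm h9
    simp only [escLookupA, escapeSeqsA, List.find?, e1, e2, e3, e4, e5, e6, e7, e8, e9,
               Option.map_none]

theorem isHexB_iff (c : Char) :
    isHexB c = true ↔ (('0' ≤ c ∧ c ≤ '9') ∨ ('a' ≤ c ∧ c ≤ 'f') ∨ ('A' ≤ c ∧ c ≤ 'F')) := by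
  simp [isHexB]
  tauto

theorem isOctB_iff (c : Char) : isOctB c = true ↔ ('0' ≤ c ∧ c ≤ '7') := by
  simp [isOctB]

theorem hexval_eq (c : Char)
    (h : ('0' ≤ c ∧ c ≤ '9') ∨ ('a' ≤ c ∧ c ≤ 'f') ∨ ('A' ≤ c ∧ c ≤ 'F')) :
    hexValA c = hexDigB c := by
  simp only [char_le_iff] at h
  have h0 : ('0' : Char).toNat = 48 := rfl
  have h9 : ('9' : Char).toNat = 57 := rfl
  have ha : ('a' : Char).toNat = 97 := rfl
  have hf : ('f' : Char).toNat = 102 := rfl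
  have hA : ('A' : Char).toNat = 65 := rfl
  have hF : ('F' : Char).toNat = 70 := rfl
  rw [h0, h9, ha, hf, hA, hF] at h
  unfold hexValA hexDigB
  simp only [char_le_iff, h0, h9, ha]
  split_ifs <;> omega

def hexCont (num dg : Nat) (l : List Char) : List Char :=
  match (hexLoopB num dg l).1 with
  | some v => Char.ofNat v :: goB (hexLoopB num dg l).2
  | none => []

def octCont (num need : Nat) (l : List Char) : List Char :=
  match (octLoopB num need l).1 with
  | some v => Char.ofNat v :: goB (octLoopB num need l).2
  | none => []

-- continuation semantics of A's remaining input in escape mode (proof-side helper)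
def escCont (l : List Char) : List Char :=
  match l with
  | [] => []
  | d :: rest =>
    match escB d with
    | some e => e :: goB rest
    | none =>
      if d = 'x' || d = 'X' then hexCont 0 0 rest
      else if isOctB d then octCont (d.toNat - 48) (if d.toNat - 48 ≤ 3 then 2 else 1) rest
      else d :: goB rest

theorem goB_bs (rest : List Char) : goB ('\\' :: rest) = escCont rest := by
  cases rest with
  | nil => simp [goB, escCont]
  | cons d rest2 =>
    simp [goB, escCont, hexCont, octCont]

theorem main_lemma (l : List Char) :
    (∀ n d r, (l.foldl stepA ⟨false, false, false, n, d, r⟩).r = r ++ goB l)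
    ∧ (∀ n d r, (l.foldl stepA ⟨true, false, false, n, d, r⟩).r = r ++ escCont l)
    ∧ (∀ num dg r, (l.foldl stepA ⟨true, true, false, num, dg, r⟩).r = r ++ hexCont num dg l)
    ∧ (∀ num dg r, (l.foldl stepA ⟨true, false, true, num, dg, r⟩).r = r ++ octCont num (3 - dg) l) := by
  induction l with
  | nil =>
    refine ⟨?_, ?_, ?_, ?_⟩ <;> intros <;>
      simp [List.foldl, goB, escCont, hexCont, octCont, hexLoopB, octLoopB]
  | cons c rest ih =>
    obtain ⟨ih0, ihE, ihH, ihO⟩ := ih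
    refine ⟨?_, ?_, ?_, ?_⟩
    -- neutral state
    · intro n d r
      simp only [List.foldl]
      by_cases hc : c = '\\'
      · subst hc
        have hs : stepA ⟨false, false, false, n, d, r⟩ '\\' = ⟨true, false, false, n, d, r⟩ := by
          simp [stepA]
        rw [hs, ihE, goB_bs]
      · have hs : stepA ⟨false, false, false, n, d, r⟩ c = ⟨false, false, false, n, d, r ++ [c]⟩ := by
          simp [stepA, hc]
        rw [hs, ih0]
        conv_rhs => rw [goB.eq_def]
        simp [hc]
    -- escape state
    · intro n d r
      simp only [List.foldl]
      cases hE : escB c with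
      | some e =>
        have hL : escLookupA c = some e := by rw [escB_eq, hE]
        have hs : stepA ⟨true, false, false, n, d, r⟩ c = ⟨false, false, false, n, d, r ++ [e]⟩ := by
          simp [stepA, hL]
        rw [hs, ih0]
        simp [escCont, hE]
      | none =>
        have hL : escLookupA c = none := by rw [escB_eq, hE]
        by_cases hO : ('0' ≤ c ∧ c ≤ '7')
        · have hx1 : c ≠ 'x' := by
            intro h; subst h; rw [char_le_iff] at hO; exact absurd hO.2 (by decide)
          have hx2 : c ≠ 'X' := by
            intro h; subst h; rw [char_le_iff] at hO; exact absurd hO.2 (by decide)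
          have hob : isOctB c = true := (isOctB_iff c).mpr hO
          have hs : stepA ⟨true, false, false, n, d, r⟩ c =
              ⟨true, false, true, octValA c, if octValA c ≤ 3 then 1 else 2, r⟩ := by
            simp [stepA, hL, hO]
          rw [hs, ihO]
          have hneed : (3 - if octValA c ≤ 3 then 1 else 2) =
              (if c.toNat - 48 ≤ 3 then 2 else 1) := by
            unfold octValA; split_ifs <;> rfl
          rw [hneed]
          simp [escCont, hE, hx1, hx2, hob, octValA]
        · by_cases hX : c = 'x' ∨ c = 'X'
          · have hs : stepA ⟨true, false, false, n, d, r⟩ c = ⟨true, true, false, 0, 0, r⟩ := by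
              simp [stepA, hL, hO, hX]
            rw [hs, ihH]
            rcases hX with h | h <;> subst h <;> simp [escCont, hE]
          · have hob : isOctB c = false := by
              rw [Bool.eq_false_iff]; intro h; exact hO ((isOctB_iff c).mp h)
            have hx1 : c ≠ 'x' := fun h => hX (Or.inl h)
            have hx2 : c ≠ 'X' := fun h => hX (Or.inr h)
            have hs : stepA ⟨true, false, false, n, d, r⟩ c = ⟨false, false, false, n, d, r ++ [c]⟩ := by
              simp [stepA, hL, hO, hX]
            rw [hs, ih0]
            simp [escCont, hE, hx1, hx2, hob]
    -- hex state
    · intro num dg r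
      simp only [List.foldl]
      by_cases hH : (('0' ≤ c ∧ c ≤ '9') ∨ ('a' ≤ c ∧ c ≤ 'f') ∨ ('A' ≤ c ∧ c ≤ 'F'))
      · have hb : isHexB c = true := (isHexB_iff c).mpr hH
        have hv : hexValA c = hexDigB c := hexval_eq c hH
        by_cases h2 : dg + 1 ≥ 2
        · have hs : stepA ⟨true, true, false, num, dg, r⟩ c =
              ⟨false, false, false, num * 16 + hexValA c, dg + 1,
               r ++ [Char.ofNat (num * 16 + hexValA c)]⟩ := by
            simp [stepA, hH, h2]
          rw [hs, ih0]
          simp [hexCont, hexLoopB, hb, h2, hv]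
        · have hs : stepA ⟨true, true, false, num, dg, r⟩ c =
              ⟨true, true, false, num * 16 + hexValA c, dg + 1, r⟩ := by
            simp [stepA, hH, h2]
          rw [hs, ihH]
          simp [hexCont, hexLoopB, hb, h2, hv]
      · have hb : isHexB c = false := by
          rw [Bool.eq_false_iff]; intro h; exact hH ((isHexB_iff c).mp h)
        have hs : stepA ⟨true, true, false, num, dg, r⟩ c =
            ⟨false, false, false, num, 2, r ++ [Char.ofNat num]⟩ := by
          simp [stepA, hH]
        rw [hs, ih0]
        simp [hexCont, hexLoopB, hb]
    -- octal state
    · intro num dg r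
      simp only [List.foldl]
      by_cases hO : ('0' ≤ c ∧ c ≤ '7')
      · have hob : isOctB c = true := (isOctB_iff c).mpr hO
        by_cases h3 : dg + 1 ≥ 3
        · have hs : stepA ⟨true, false, true, num, dg, r⟩ c =
              ⟨false, false, false, num * 8 + octValA c, dg + 1,
               r ++ [Char.ofNat (num * 8 + octValA c)]⟩ := by
            simp [stepA, hO, h3]
          rw [hs, ih0]
          have hn : 3 - dg ≤ 1 := by omega
          simp [octCont, octLoopB, hob, hn, octValA]
        · have hs : stepA ⟨true, false, true, num, dg, r⟩ c =
              ⟨true, false, true, num * 8 + octValA c, dg + 1, r⟩ := by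
            simp [stepA, hO, h3]
          rw [hs, ihO]
          have hn : ¬ (3 - dg ≤ 1) := by omega
          have hsub : 3 - dg - 1 = 3 - (dg + 1) := by omega
          simp [octCont, octLoopB, hob, hn, hsub, octValA]
      · have hob : isOctB c = false := by
          rw [Bool.eq_false_iff]; intro h; exact hO ((isOctB_iff c).mp h)
        have hs : stepA ⟨true, false, true, num, dg, r⟩ c =
            ⟨false, false, false, num, 3, r ++ [Char.ofNat num]⟩ := by
          simp [stepA, hO]
        rw [hs, ih0]
        simp [octCont, octLoopB, hob]

-- ===== VERDICT (by name: the statement is the Claim_ definition above) =====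
theorem expandCString_spec : Claim_equal_expandCString := by
  intro s _
  unfold Spec_expandCString expandCString expandCString_alt
  rw [(main_lemma s.toList).1 0 0 []]
  rfl
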